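-- pv_equiv track=rewrite | github.com/KingAscent/LeetCode | Easy/Python/1374. Generate a String With Characters That Have Odd Counts.py | generateTheString
-- ===== SOURCE A (Python) =====
-- def generateTheString(n):
--     odd = ''
--
--     for i in range(n - 1):
--         odd = odd + 'a'
--
--     if n % 2 == 0:
--         odd = odd + 'b'
--     else:
--         odd = odd + 'a'
--
--     return odd
-- ===== SOURCE B (Python) =====
-- def generateTheString(n):
--     return 'a' * (n - 1) + ('b' if n % 2 == 0 else 'a')
-- ===== Notes on version B (the rewrite author's own statement) =====
-- stated objective: faster
-- what changed: Replaces the character-by-character quadratic string concatenation loop with a closed-form string repetition 'a'*(n-1) plus the parity character.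
import Mathlib
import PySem

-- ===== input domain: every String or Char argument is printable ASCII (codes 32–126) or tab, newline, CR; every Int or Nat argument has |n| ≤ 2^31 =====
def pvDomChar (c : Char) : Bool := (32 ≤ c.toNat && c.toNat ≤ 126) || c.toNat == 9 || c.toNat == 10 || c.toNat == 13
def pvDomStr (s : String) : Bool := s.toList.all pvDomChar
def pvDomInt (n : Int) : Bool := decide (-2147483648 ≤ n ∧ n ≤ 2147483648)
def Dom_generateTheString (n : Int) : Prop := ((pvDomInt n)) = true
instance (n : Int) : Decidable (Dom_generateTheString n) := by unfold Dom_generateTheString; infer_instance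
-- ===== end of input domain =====

-- B replaces A's quadratic character-by-character concatenation loop by the closed form
-- 'a'*(n-1) + parity character (objective: faster, asymptotic).

-- ===== PORT A =====
-- literal port of A: build odd by appending 'a' once per iteration of range(n-1),
-- then append 'b' or 'a' depending on n % 2 (Python floor mod).
def generateTheString (n : Int) : String :=
  let odd : List Char := (PySem.List.pyRange 0 (n - 1) 1).foldl (fun acc _ => acc ++ ['a']) []
  if PySem.Int.mod n 2 = 0 then String.ofList (odd ++ ['b']) else String.ofList (odd ++ ['a'])

-- ===== PORT B =====
-- literal port of B: 'a' * (n-1)  (empty for n ≤ 1)  ++ parity character.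
def generateTheString_alt (n : Int) : String :=
  String.ofList (List.replicate (n - 1).toNat 'a' ++ (if PySem.Int.mod n 2 = 0 then ['b'] else ['a']))

-- ===== PRECONDITION & SPEC =====
def Spec_generateTheString (n : Int) (out : String) : Prop := out = generateTheString_alt n
instance (n : Int) (out : String) : Decidable (Spec_generateTheString n out) := by unfold Spec_generateTheString; infer_instance

-- ===== CLAIM (what is proved, stated in full; the proofs are below) =====
def Claim_equal_generateTheString : Prop := ∀ (n : Int), Dom_generateTheString n → Spec_generateTheString n (generateTheString n)

-- ===== LEMMAS AND PROOFS =====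

-- folding "append one 'a'" over any list produces the accumulator followed by that many 'a's
theorem foldl_append_a (l : List Int) (acc : List Char) :
    l.foldl (fun acc _ => acc ++ ['a']) acc = acc ++ List.replicate l.length 'a' := by
  induction l generalizing acc with
  | nil => simp
  | cons x xs ih =>
      simp [List.foldl, ih, List.replicate_succ]

-- ===== VERDICT (by name: the statement is the Claim_ definition above) =====
theorem generateTheString_spec : Claim_equal_generateTheString := by
  intro n _
  unfold Spec_generateTheString generateTheString generateTheString_alt
  rw [foldl_append_a]
  simp [PySem.List.length_pyRange_one]
  split_ifs <;> rfl
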